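-- pv_equiv track=rewrite | github.com/RomeoSajina/PoseTracking | pose_visualizer.py | break_pose_into_parts
-- ===== SOURCE A (Python) =====
-- def break_pose_into_parts(tracked_pose):
--
--     pose_by_parts = dict()
--
--     for pose in tracked_pose:
--
--         for i, part in enumerate(pose):
--
--             if pose_by_parts.get(i) is None:
--                 pose_by_parts[i] = list()
--
--             pose_by_parts[i].append(part)
--
--     return pose_by_parts
-- ===== SOURCE B (Python) =====
-- def break_pose_into_parts(tracked_pose):
--     maxlen = max((len(pose) for pose in tracked_pose), default=0)
--     return {i: [pose[i] for pose in tracked_pose if len(pose) > i]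
--             for i in range(maxlen)}
-- ===== Notes on version B (the rewrite author's own statement) =====
-- stated objective: alternative
-- what changed: B transposes column-major: it computes the maximum pose length once and builds each part index's list with one comprehension per column, instead of A's row-major loop that grows dict entries pose by pose.
import Mathlib
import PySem

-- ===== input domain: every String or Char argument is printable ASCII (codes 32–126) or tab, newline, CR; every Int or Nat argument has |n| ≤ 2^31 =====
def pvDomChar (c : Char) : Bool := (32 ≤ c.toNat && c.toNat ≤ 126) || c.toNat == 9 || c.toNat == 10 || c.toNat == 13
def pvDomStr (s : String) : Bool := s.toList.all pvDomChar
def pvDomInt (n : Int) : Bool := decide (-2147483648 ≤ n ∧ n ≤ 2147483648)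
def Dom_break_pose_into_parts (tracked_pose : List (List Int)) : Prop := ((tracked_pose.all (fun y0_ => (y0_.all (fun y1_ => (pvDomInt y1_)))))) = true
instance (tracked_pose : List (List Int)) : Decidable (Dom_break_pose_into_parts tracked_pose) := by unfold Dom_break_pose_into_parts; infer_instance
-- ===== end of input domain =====

-- B transposes column-major (max length once, then one list per part index) instead of A's
-- row-major dict-growing loop; same result, an alternative decomposition (no speed claim).

-- ===== PORT A =====
def break_pose_into_parts (tracked_pose : List (List Int)) : List (Int × List Int) :=
  (tracked_pose.foldl
    (fun pose_by_parts pose =>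
      (PySem.List.enumerate pose 0).foldl
        (fun pose_by_parts ip =>
          let d := if pose_by_parts.get? ip.1 = none then pose_by_parts.insert ip.1 [] else pose_by_parts
          d.modify ip.1 [] (fun l => l ++ [ip.2]))
        pose_by_parts)
    PySem.Dict.empty).items

-- ===== PORT B =====
def break_pose_into_parts_alt (tracked_pose : List (List Int)) : List (Int × List Int) :=
  let maxlen : Int := PySem.List.maxD (tracked_pose.map (fun pose => (pose.length : Int))) (fun x => x) 0
  (PySem.List.pyRange 0 maxlen 1).map (fun i =>
    (i, tracked_pose.filterMap (fun pose => PySem.List.pyGet? pose i)))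

-- ===== PRECONDITION & SPEC =====
def Spec_break_pose_into_parts (tracked_pose : List (List Int)) (out : List (Int × List Int)) : Prop := out = break_pose_into_parts_alt tracked_pose
instance (tracked_pose : List (List Int)) (out : List (Int × List Int)) : Decidable (Spec_break_pose_into_parts tracked_pose out) := by unfold Spec_break_pose_into_parts; infer_instance

-- ===== CLAIM (what is proved, stated in full; the proofs are below) =====
def Claim_equal_break_pose_into_parts : Prop := ∀ (tracked_pose : List (List Int)), Dom_break_pose_into_parts tracked_pose → Spec_break_pose_into_parts tracked_pose (break_pose_into_parts tracked_pose)

-- ===== LEMMAS AND PROOFS =====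

-- A's guarded insert-then-append step is exactly 'd[i] = d.get(i, []) + [part]'.
lemma stepA_eq (d : PySem.Dict Int (List Int)) (ip : Int × Int) :
    (let d' := if d.get? ip.1 = none then d.insert ip.1 [] else d
     d'.modify ip.1 [] (fun l => l ++ [ip.2]))
    = d.modify ip.1 [] (fun l => l ++ [ip.2]) := by
  by_cases h : d.get? ip.1 = none
  · have h0 : d.getD ip.1 [] = [] := PySem.Dict.getD_of_get?_eq_none d [] h
    simp only [h, if_true, PySem.Dict.modify, PySem.Dict.getD_insert_self,
      PySem.Dict.insert_insert_self, h0]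
  · simp [h]

-- which parts of one enumerated pose land at key c
lemma enum_filter (pose : List Int) (s c : Int) :
    ((PySem.List.enumerate pose s).filter (fun p => p.1 == c)).map (·.2)
    = if c < s then [] else (pose[(c - s).toNat]?).toList := by
  induction pose generalizing s with
  | nil => rw [PySem.List.enumerate_nil]; split <;> simp
  | cons x xs ih =>
    rw [PySem.List.enumerate_cons]
    by_cases hc : s = c
    · subst hc
      have hnone : ((PySem.List.enumerate xs (s + 1)).filter (fun p => p.1 == s)).map (·.2) = [] := by
        rw [ih (s + 1), if_pos (by omega)]
      rw [List.filter_cons, show (((s, x).1 == s) = true) from by simp, if_pos (by simp),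
        List.map_cons, hnone, if_neg (by omega)]
      simp
    · have hb : ((s, x).1 == c) = false := by simpa using hc
      rw [List.filter_cons, hb, if_neg (by simp)]
      rw [ih (s + 1)]
      by_cases h1 : c < s
      · rw [if_pos (by omega), if_pos h1]
      · by_cases h2 : c < s + 1
        · exact absurd (by omega : s = c) hc
        · rw [if_neg h2, if_neg h1,
            show (c - s).toNat = (c - (s + 1)).toNat + 1 from by omega]
          simp

lemma update_append_singleton (s : PySem.Set Int) (xs : List Int) (x : Int) :
    PySem.Set.update s (xs ++ [x]) = PySem.Set.add (PySem.Set.update s xs) x := by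
  unfold PySem.Set.update
  rw [List.foldl_append]
  rfl

lemma setUpdate_range (m L : Nat) :
    PySem.Set.update ((List.range m).map (fun (i : Nat) => (i : Int))) ((List.range L).map (fun (i : Nat) => (i : Int)))
    = (List.range (max m L)).map (fun (i : Nat) => (i : Int)) := by
  induction L with
  | zero => simp [PySem.Set.update]
  | succ L ih =>
    rw [List.range_succ, List.map_append]
    simp only [List.map_cons, List.map_nil]
    rw [update_append_singleton, ih]
    by_cases h : L < m
    · have hc : PySem.Set.contains ((List.range (max m L)).map (fun (i : Nat) => (i : Int))) (L : Int) = true := by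
        simp [PySem.Set.contains]
        omega
      unfold PySem.Set.add
      rw [hc, if_pos rfl, show max m (L + 1) = max m L from by omega]
    · have hc : PySem.Set.contains ((List.range (max m L)).map (fun (i : Nat) => (i : Int))) (L : Int) = false := by
        simp [PySem.Set.contains]
        omega
      unfold PySem.Set.add
      rw [hc, if_neg (by simp : ¬ (false = true)),
        show max m (L + 1) = max m L + 1 from by omega, List.range_succ, List.map_append]
      simp
      omega

lemma keysSet (tp : List (List Int)) (m : Nat) :
    PySem.Set.update ((List.range m).map (fun (i : Nat) => (i : Int)))
        (tp.flatMap (fun p => (List.range p.length).map (fun (i : Nat) => (i : Int))))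
    = (List.range (tp.foldl (fun a p => max a p.length) m)).map (fun (i : Nat) => (i : Int)) := by
  induction tp generalizing m with
  | nil => simp [PySem.Set.update]
  | cons p rest ih =>
    rw [List.flatMap_cons, List.foldl_cons]
    rw [show PySem.Set.update ((List.range m).map (fun (i : Nat) => (i : Int)))
        ((List.range p.length).map (fun (i : Nat) => (i : Int))
          ++ rest.flatMap (fun p => (List.range p.length).map (fun (i : Nat) => (i : Int))))
        = PySem.Set.update
            (PySem.Set.update ((List.range m).map (fun (i : Nat) => (i : Int)))
              ((List.range p.length).map (fun (i : Nat) => (i : Int))))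
            (rest.flatMap (fun p => (List.range p.length).map (fun (i : Nat) => (i : Int)))) from by
      simp [PySem.Set.update, List.foldl_append]]
    rw [setUpdate_range, ih]

lemma maxD_len (tp : List (List Int)) :
    PySem.List.maxD (tp.map (fun pose => (pose.length : Int))) (fun x => x) 0
    = ((tp.foldl (fun a p => max a p.length) 0 : Nat) : Int) := by
  cases tp with
  | nil => simp [PySem.List.maxD, PySem.List.max?]
  | cons p rest =>
    rw [List.map_cons, PySem.List.maxD, PySem.List.max?_id_cons, Option.getD_some, List.foldl_cons]
    have key : ∀ (l : List (List Int)) (a : Nat),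
        (l.map (fun pose => (pose.length : Int))).foldl max ((a : Nat) : Int)
        = ((l.foldl (fun a p => max a p.length) a : Nat) : Int) := by
      intro l
      induction l with
      | nil => intro a; simp
      | cons q r ihr =>
        intro a
        rw [List.map_cons, List.foldl_cons, List.foldl_cons,
          show max ((a : Nat) : Int) (q.length : Int) = ((max a q.length : Nat) : Int) from by
            push_cast; rfl, ihr]
    rw [key rest p.length, Nat.zero_max]

-- the canonical column-major form both ports reduce to
lemma canonical (tp : List (List Int)) :
    break_pose_into_parts tp
    = (List.range (tp.foldl (fun a p => max a p.length) 0)).map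
        (fun (i : Nat) => ((i : Int), tp.filterMap (fun p => p[i]?))) := by
  unfold break_pose_into_parts
  rw [show (fun (pose_by_parts : PySem.Dict Int (List Int)) (pose : List Int) =>
      (PySem.List.enumerate pose 0).foldl
        (fun pose_by_parts ip =>
          let d := if pose_by_parts.get? ip.1 = none then pose_by_parts.insert ip.1 [] else pose_by_parts
          d.modify ip.1 [] (fun l => l ++ [ip.2]))
        pose_by_parts)
      = (fun (pose_by_parts : PySem.Dict Int (List Int)) (pose : List Int) =>
      (PySem.List.enumerate pose 0).foldl
        (fun d ip => d.modify ip.1 [] (fun l => l ++ [ip.2]))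
        pose_by_parts) from by
    funext d pose
    exact PySem.List.foldl_congr_mem _ _ _ _ (fun acc x _ => stepA_eq acc x)]
  rw [← List.foldl_flatMap (f := fun pose => PySem.List.enumerate pose 0)]
  set pairs := tp.flatMap (fun pose => PySem.List.enumerate pose 0) with hpairs
  set D := pairs.foldl (fun d p => d.modify p.1 [] (fun l => l ++ [p.2])) PySem.Dict.empty with hD
  have hkeys : D.keys
      = (List.range (tp.foldl (fun a p => max a p.length) 0)).map (fun (i : Nat) => (i : Int)) := by
    rw [hD, PySem.Dict.keys_foldl_modify_key pairs (fun p => p.1) [] (fun _ p l => l ++ [p.2])]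
    rw [hpairs, List.map_flatMap]
    rw [show (fun (pose : List Int) => (PySem.List.enumerate pose 0).map (fun p => p.1))
        = fun (pose : List Int) => (List.range pose.length).map (fun (i : Nat) => (i : Int)) from by
      funext pose
      rw [PySem.List.map_fst_enumerate, show (0 : Int) + (pose.length : Int) = (pose.length : Int)
        from by ring, PySem.List.pyRange_zero_nat]]
    simpa [PySem.Dict.keys_empty] using keysSet tp 0
  have hnodup : D.keys.Nodup := by
    rw [hkeys]
    exact (List.nodup_range).map (fun a b h => by exact_mod_cast h)
  rw [PySem.Dict.items_eq_map_keys D hnodup [], hkeys, List.map_map]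
  apply List.map_congr_left
  intro i _
  simp only [Function.comp_apply]
  congr 1
  rw [hD, PySem.Dict.getD_foldl_modify_append pairs PySem.Dict.empty ((i : Int)),
    PySem.Dict.getD_empty, List.nil_append, hpairs, List.filter_flatMap, List.map_flatMap,
    List.filterMap_eq_flatMap_toList]
  apply List.flatMap_congr
  intro p _
  rw [enum_filter p 0 (i : Int), if_neg (by omega : ¬ ((i : Int) < 0)),
    show ((i : Int) - 0).toNat = i from by omega]

lemma alt_canonical (tp : List (List Int)) :
    break_pose_into_parts_alt tp
    = (List.range (tp.foldl (fun a p => max a p.length) 0)).map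
        (fun (i : Nat) => ((i : Int), tp.filterMap (fun p => p[i]?))) := by
  simp only [break_pose_into_parts_alt, maxD_len]
  rw [PySem.List.pyRange_zero_nat, List.map_map]
  apply List.map_congr_left
  intro i _
  simp only [Function.comp_apply]
  congr 1
  apply List.filterMap_congr
  intro p _
  rw [PySem.List.pyGet?_natCast]

-- ===== VERDICT (by name: the statement is the Claim_ definition above) =====
theorem break_pose_into_parts_spec : Claim_equal_break_pose_into_parts := by
  intro tp _
  unfold Spec_break_pose_into_parts
  rw [canonical, alt_canonical]
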